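-- pv_equiv track=rewrite | github.com/SeojinYoon/Statistics_sj | CLMN/Replay_Exp/experiment/Replay_Experiment_Tool.py | response_complete_sequence
-- ===== SOURCE A (Python) =====
-- def response_complete_sequence(steps, response_times, divided_count):
--     # complete sequence 단위로 intertap interval을 묶음
--     response_per_complete_sequence = []
--     all_response_per_complete_sequence = []
--
--     # make coordinate
--     for step_index in range(0, len(steps)):  # iterate all step
--         response_step = response_times[step_index]
--         for tap_index in range(0, len(response_times[step_index])):  # iterate all tap
--             if tap_index % divided_count == 0:
--                 response_per_complete_sequence = []
--                 response_per_complete_sequence.append(response_step[tap_index])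
--             else:
--                 response_per_complete_sequence.append(response_step[tap_index])
--             if len(response_per_complete_sequence) == divided_count:
--                 all_response_per_complete_sequence.append(response_per_complete_sequence)
--             elif tap_index == len(response_times[step_index]) - 1:  # 마지막 시퀀스
--                 all_response_per_complete_sequence.append(response_per_complete_sequence)
--
--     return all_response_per_complete_sequence
-- ===== SOURCE B (Python) =====
-- def response_complete_sequence(steps, response_times, divided_count):
--     result = []
--     for step_index in range(len(steps)):
--         row = response_times[step_index]
--         for i in range(0, len(row), divided_count):
--             result.append(row[i:i + divided_count])
--     return result
-- ===== Notes on version B (the rewrite author's own statement) =====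
-- stated objective: simpler
-- what changed: Replaces A's per-element modulo counter, running buffer and last-element special case with a single stride-slicing loop that emits row[i:i+divided_count] chunks directly. Pre_ excludes non-positive divided_count (a chunk size; A raises ZeroDivisionError for 0 on non-empty rows and returns accidental buffer leftovers for negative counts, where B's range step would raise or slice nothing) and steps longer than response_times (IndexError).
-- outside the precondition, e.g. on response_complete_sequence([0], [[1, 2, 3, 4]], -2): A returns [[3, 4]], B returns []; on response_complete_sequence([0], [[]], 0): A returns [], B raises ValueError
import Mathlib
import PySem

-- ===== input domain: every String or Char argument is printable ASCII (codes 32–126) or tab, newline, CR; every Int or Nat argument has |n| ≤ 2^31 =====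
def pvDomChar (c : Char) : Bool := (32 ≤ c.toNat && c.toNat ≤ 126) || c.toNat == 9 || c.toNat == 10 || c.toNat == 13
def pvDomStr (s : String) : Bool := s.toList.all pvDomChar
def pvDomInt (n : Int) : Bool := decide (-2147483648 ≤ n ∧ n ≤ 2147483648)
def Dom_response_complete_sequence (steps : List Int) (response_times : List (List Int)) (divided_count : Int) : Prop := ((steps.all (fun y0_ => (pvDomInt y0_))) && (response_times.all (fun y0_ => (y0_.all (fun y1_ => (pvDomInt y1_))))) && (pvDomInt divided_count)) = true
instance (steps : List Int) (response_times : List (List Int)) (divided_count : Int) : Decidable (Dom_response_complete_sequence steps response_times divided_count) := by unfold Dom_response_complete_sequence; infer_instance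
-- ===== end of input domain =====

-- B replaces A's modulo-counter/buffer bookkeeping with direct stride slicing (objective: simpler).

-- ===== PORT A =====
-- A-side helper: the body of A's inner tap loop (buffer, accumulated chunks).
def stepA (row : List Int) (d : Int) (st : List Int × List (List Int)) (tap : Int) :
    List Int × List (List Int) :=
  let x := PySem.List.pyGetD row tap 0
  let buf := if PySem.Int.mod tap d = 0 then [x] else st.1 ++ [x]
  let all := if (buf.length : Int) = d then st.2 ++ [buf]
             else if tap = (row.length : Int) - 1 then st.2 ++ [buf]
             else st.2
  (buf, all)

def response_complete_sequence (steps : List Int) (response_times : List (List Int)) (divided_count : Int) : List (List Int) :=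
  ((PySem.List.pyRange 0 steps.length 1).foldl
      (fun st step_index =>
        let response_step := PySem.List.pyGetD response_times step_index []
        (PySem.List.pyRange 0 response_step.length 1).foldl (stepA response_step divided_count) st)
      ([], [])).2

-- ===== PORT B =====
-- B-side helper: append one slice row[i : i+d].
def stepB (row : List Int) (d : Int) (acc : List (List Int)) (i : Int) : List (List Int) :=
  acc ++ [PySem.List.slice row (some i) (some (i + d))]

def response_complete_sequence_alt (steps : List Int) (response_times : List (List Int)) (divided_count : Int) : List (List Int) :=
  (PySem.List.pyRange 0 steps.length 1).foldl
    (fun res step_index =>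
      let row := PySem.List.pyGetD response_times step_index []
      (PySem.List.pyRange 0 row.length divided_count).foldl (stepB row divided_count) res)
    []

-- ===== PRECONDITION & SPEC =====
-- Pre_ excludes non-positive divided_count (a chunk size: A raises ZeroDivisionError for 0 on
-- non-empty rows and returns accidental buffer leftovers for negative counts, where B raises or
-- slices nothing) and steps longer than response_times (IndexError in both).
def Pre_response_complete_sequence (steps : List Int) (response_times : List (List Int)) (divided_count : Int) : Prop :=
  0 < divided_count ∧ steps.length ≤ response_times.length
instance (steps : List Int) (response_times : List (List Int)) (divided_count : Int) : Decidable (Pre_response_complete_sequence steps response_times divided_count) := by unfold Pre_response_complete_sequence; infer_instance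

def pvWitness_response_complete_sequence : List Int × List (List Int) × Int := ([1, 2], [[1, 2, 3], [4]], 2)

def Spec_response_complete_sequence (steps : List Int) (response_times : List (List Int)) (divided_count : Int) (out : List (List Int)) : Prop := out = response_complete_sequence_alt steps response_times divided_count
instance (steps : List Int) (response_times : List (List Int)) (divided_count : Int) (out : List (List Int)) : Decidable (Spec_response_complete_sequence steps response_times divided_count out) := by unfold Spec_response_complete_sequence; infer_instance

-- ===== CLAIM (what is proved, stated in full; the proofs are below) =====
def Claim_equal_response_complete_sequence : Prop := ∀ (steps : List Int) (response_times : List (List Int)) (divided_count : Int), Dom_response_complete_sequence steps response_times divided_count → Pre_response_complete_sequence steps response_times divided_count → Spec_response_complete_sequence steps response_times divided_count (response_complete_sequence steps response_times divided_count)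

-- ===== LEMMAS AND PROOFS =====

-- chunking spec shared by both inner loops: successive blocks of d1+1 elements
def chunksPos (d1 : Nat) (l : List Int) : List (List Int) :=
  match l with
  | [] => []
  | x :: t => ((x :: t).take (d1+1)) :: chunksPos d1 ((x :: t).drop (d1+1))
termination_by l.length
decreasing_by simp

lemma chunksPos_nil (d1 : Nat) : chunksPos d1 [] = [] := by unfold chunksPos; rfl

lemma chunksPos_cons (d1 : Nat) (l : List Int) (h : l ≠ []) :
    chunksPos d1 l = l.take (d1+1) :: chunksPos d1 (l.drop (d1+1)) := by
  cases l with
  | nil => exact absurd rfl h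
  | cons x t => rw [chunksPos.eq_def]

lemma pyRange_pos_nil (a b s : Int) (hs : 0 < s) (hab : b ≤ a) :
    PySem.List.pyRange a b s = [] := by
  rw [PySem.List.pyRange_of_pos a b hs, if_neg (by omega)]
  simp

lemma pyRange_pos_cons (a b s : Int) (hs : 0 < s) (hab : a < b) :
    PySem.List.pyRange a b s = a :: PySem.List.pyRange (a + s) b s := by
  rw [PySem.List.pyRange_of_pos a b hs, PySem.List.pyRange_of_pos (a+s) b hs, if_pos hab]
  have hcnt : ((b - a + s - 1)/s).toNat
      = (if a + s < b then ((b - (a+s) + s - 1)/s).toNat else 0) + 1 := by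
    by_cases h2 : a + s < b
    · rw [if_pos h2]
      have he : b - a + s - 1 = (b - (a+s) + s - 1) + 1*s := by ring
      rw [he, Int.add_mul_ediv_right _ _ (by omega)]
      have hpos : 0 ≤ (b - (a+s) + s - 1)/s := Int.ediv_nonneg (by omega) (by omega)
      omega
    · rw [if_neg h2]
      have he : b - a + s - 1 = (b - a - 1) + 1*s := by ring
      rw [he, Int.add_mul_ediv_right _ _ (by omega),
          Int.ediv_eq_zero_of_lt (by omega) (by omega)]
      decide
  rw [hcnt, List.range_succ_eq_map]
  simp only [List.map_cons, Nat.cast_zero, mul_zero, add_zero, List.map_map]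
  refine congrArg _ ?_
  refine List.map_congr_left ?_
  intro k _
  simp only [Function.comp_apply]
  push_cast
  ring

-- the B-side inner loop from index j (a multiple of d1+1) produces the chunks of row.drop j
lemma innerB_from (row : List Int) (d1 : Nat) :
    ∀ (c j : Nat), row.length - j ≤ c → (d1+1) ∣ j → ∀ (acc : List (List Int)),
      (PySem.List.pyRange (j : Int) (row.length : Int) ((d1+1 : Nat) : Int)).foldl
        (stepB row ((d1+1 : Nat) : Int)) acc
      = acc ++ chunksPos d1 (row.drop j) := by
  intro c
  induction c with
  | zero =>
    intro j h hdvd acc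
    have hle : row.length ≤ j := by omega
    rw [pyRange_pos_nil _ _ _ (by exact_mod_cast Nat.succ_pos d1) (by exact_mod_cast hle)]
    simp [List.drop_eq_nil_of_le hle, chunksPos_nil]
  | succ c ih =>
    intro j h hdvd acc
    by_cases hj : row.length ≤ j
    · rw [pyRange_pos_nil _ _ _ (by exact_mod_cast Nat.succ_pos d1) (by exact_mod_cast hj)]
      simp [List.drop_eq_nil_of_le hj, chunksPos_nil]
    · rw [not_le] at hj
      rw [pyRange_pos_cons _ _ _ (by exact_mod_cast Nat.succ_pos d1) (by exact_mod_cast hj),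
          List.foldl_cons]
      have hstep : stepB row ((d1+1 : Nat) : Int) acc (j : Int)
          = acc ++ [(row.drop j).take (d1+1)] := by
        unfold stepB
        rw [PySem.List.slice_natCast_add row j (d1+1)]
      have hcast : ((j : Int) + ((d1+1 : Nat) : Int)) = ((j + (d1+1) : Nat) : Int) := by push_cast; ring
      rw [hstep, hcast, ih (j + (d1+1)) (by omega) (dvd_add hdvd (dvd_refl _)) _]
      rw [chunksPos_cons d1 (row.drop j) (by simp [List.drop_eq_nil_iff]; omega)]
      simp [List.drop_drop]

-- one step of A's inner loop at a non-reset index i (i strictly inside chunk [j, j+d1], i in range)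
lemma stepA_eval (row : List Int) (d1 j i : Nat) (acc : List (List Int))
    (hdvd : (d1+1) ∣ j) (hji : j + 1 ≤ i) (hid : i ≤ j + d1) (hin : i < row.length) :
    stepA row ((d1+1 : Nat) : Int) ((row.drop j).take (i - j), acc) (i : Int)
    = ((row.drop j).take (i - j + 1),
       if i = j + d1 ∨ i + 1 = row.length
       then acc ++ [(row.drop j).take (i - j + 1)] else acc) := by
  have hmodv : i % (d1+1) = i - j := by
    obtain ⟨t, ht⟩ := hdvd
    conv_lhs => rw [(by omega : i = (d1+1) * t + (i - j))]
    rw [Nat.mul_add_mod]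
    exact Nat.mod_eq_of_lt (by omega)
  have hmod : ¬ (PySem.Int.mod (i : Int) ((d1+1 : Nat) : Int) = 0) := by
    rw [PySem.Int.mod_natCast i (d1+1), hmodv]
    exact_mod_cast (by omega : ¬ ((i - j : Nat) = 0))
  have hget : PySem.List.pyGetD row (i : Int) 0 = row[i]'hin := by
    rw [PySem.List.pyGetD_natCast, List.getD_eq_getElem row 0 hin]
  have hlt : i - j < (row.drop j).length := by simp; omega
  have hbuf : (row.drop j).take (i - j) ++ [PySem.List.pyGetD row (i : Int) 0]
      = (row.drop j).take (i - j + 1) := by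
    rw [List.take_succ, List.getElem?_eq_getElem hlt, hget]
    simp [List.getElem_drop, Nat.add_sub_cancel' (by omega : j ≤ i)]
  have hlen : ((row.drop j).take (i - j + 1)).length = i - j + 1 := by
    simp; omega
  unfold stepA
  simp only [hmod, if_false, hbuf, hlen]
  by_cases h1 : i = j + d1
  · rw [if_pos (by push_cast; omega), if_pos (Or.inl h1)]
  · rw [if_neg (by push_cast; omega)]
    by_cases h2 : i + 1 = row.length
    · rw [if_pos (by push_cast; omega), if_pos (Or.inr h2)]
    · rw [if_neg (by push_cast; omega), if_neg (by tauto)]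

-- the straight stretch of A's inner loop inside one chunk (no reset, append at the end)
lemma blockA (row : List Int) (d1 : Nat) (j e : Nat)
    (he : e = min (j + (d1+1)) row.length) (_hj : j < row.length) (hdvd : (d1+1) ∣ j) :
    ∀ (m i : Nat) (acc : List (List Int)), j + 1 ≤ i → i + m = e → 1 ≤ m →
      (PySem.List.pyRange (i : Int) (e : Int) 1).foldl
        (stepA row ((d1+1 : Nat) : Int)) ((row.drop j).take (i - j), acc)
      = ((row.drop j).take (e - j), acc ++ [(row.drop j).take (e - j)]) := by
  intro m
  induction m with
  | zero => intro i acc _ _ hm; omega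
  | succ m ih =>
    intro i acc hji hie _
    have hin : i < row.length := by omega
    rw [PySem.List.pyRange_one_cons (by exact_mod_cast (by omega : i < e)), List.foldl_cons,
        stepA_eval row d1 j i acc hdvd hji (by omega) hin]
    cases m with
    | zero =>
      -- i = e - 1: the append fires and the remaining range is empty
      have hie' : i + 1 = e := by omega
      rw [if_pos (by omega)]
      have : ((i : Int) + 1) = (e : Int) := by push_cast; omega
      rw [this, PySem.List.pyRange_one_eq_nil (le_refl _), List.foldl_nil]
      have : i - j + 1 = e - j := by omega
      rw [this]
    | succ m' =>
      -- i < e - 1: no append, continue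
      rw [if_neg (by omega)]
      have hc : ((i : Int) + 1) = ((i + 1 : Nat) : Int) := by push_cast; ring
      rw [hc]
      have := ih (i + 1) acc (by omega) (by omega) (by omega)
      rw [(by omega : i + 1 - j = i - j + 1)] at this
      exact this

-- A's inner loop at a reset index j (j a multiple of d1+1, in range): the buffer restarts
lemma stepA_reset (row : List Int) (d1 j : Nat) (buf : List Int) (acc : List (List Int))
    (hdvd : (d1+1) ∣ j) (hjn : j < row.length) :
    stepA row ((d1+1 : Nat) : Int) (buf, acc) (j : Int)
    = ((row.drop j).take 1,
       if d1 = 0 ∨ j + 1 = row.length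
       then acc ++ [(row.drop j).take 1] else acc) := by
  obtain ⟨t, ht⟩ := hdvd
  have hmod : PySem.Int.mod (j : Int) ((d1+1 : Nat) : Int) = 0 := by
    rw [PySem.Int.mod_natCast, ht, Nat.mul_mod_right]
    rfl
  have hget : PySem.List.pyGetD row (j : Int) 0 = row[j]'hjn := by
    rw [PySem.List.pyGetD_natCast, List.getD_eq_getElem row 0 hjn]
  have hlt : 0 < (row.drop j).length := by simp; omega
  have htake : [PySem.List.pyGetD row (j : Int) 0] = (row.drop j).take 1 := by
    rw [(by rfl : (1 : Nat) = 0 + 1), List.take_succ, List.getElem?_eq_getElem hlt, hget]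
    simp [List.getElem_drop]
  unfold stepA
  simp only [hmod, if_true, htake]
  have hlen : ((row.drop j).take 1).length = 1 := by simp; omega
  rw [hlen]
  by_cases h1 : d1 = 0
  · rw [if_pos (by push_cast; omega), if_pos (Or.inl h1)]
  · rw [if_neg (by push_cast; omega)]
    by_cases h2 : j + 1 = row.length
    · rw [if_pos (by push_cast; omega), if_pos (Or.inr h2)]
    · rw [if_neg (by push_cast; omega), if_neg (by tauto)]

-- the A-side inner loop from a multiple of d1+1 produces the chunks of row.drop j
lemma innerA_from (row : List Int) (d1 : Nat) :
    ∀ (c j : Nat), row.length - j ≤ c → (d1+1) ∣ j →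
      ∀ (buf : List Int) (acc : List (List Int)),
      ((PySem.List.pyRange (j : Int) (row.length : Int) 1).foldl
          (stepA row ((d1+1 : Nat) : Int)) (buf, acc)).2
      = acc ++ chunksPos d1 (row.drop j) := by
  intro c
  induction c with
  | zero =>
    intro j h hdvd buf acc
    have hle : row.length ≤ j := by omega
    rw [PySem.List.pyRange_one_eq_nil (by exact_mod_cast hle)]
    simp [List.drop_eq_nil_of_le hle, chunksPos_nil]
  | succ c ih =>
    intro j h hdvd buf acc
    by_cases hj : row.length ≤ j
    · rw [PySem.List.pyRange_one_eq_nil (by exact_mod_cast hj)]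
      simp [List.drop_eq_nil_of_le hj, chunksPos_nil]
    · rw [not_le] at hj
      -- split the range at the end e of the first chunk
      set n := row.length with hn
      set e := min (j + (d1+1)) n with he
      have hje : j + 1 ≤ e := by omega
      have hen : e ≤ n := by omega
      rw [PySem.List.pyRange_one_append (j : Int) (e : Int) (n : Int)
            (by exact_mod_cast (by omega : j ≤ e)) (by exact_mod_cast hen),
          List.foldl_append]
      -- first chunk: reset step at j, then the straight stretch
      have hfirst :
          (PySem.List.pyRange (j : Int) (e : Int) 1).foldl
            (stepA row ((d1+1 : Nat) : Int)) (buf, acc)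
          = ((row.drop j).take (e - j), acc ++ [(row.drop j).take (e - j)]) := by
        rw [PySem.List.pyRange_one_cons (by exact_mod_cast hje), List.foldl_cons,
            stepA_reset row d1 j buf acc hdvd hj]
        by_cases h1 : e = j + 1
        · rw [if_pos (by omega)]
          have hc : ((j : Int) + 1) = (e : Int) := by push_cast; omega
          rw [hc, PySem.List.pyRange_one_eq_nil (le_refl _), List.foldl_nil,
              (by omega : e - j = 1)]
        · rw [if_neg (by omega)]
          have hc : ((j : Int) + 1) = ((j + 1 : Nat) : Int) := by push_cast; ring
          rw [hc]
          have := blockA row d1 j e he hj hdvd (e - (j + 1)) (j + 1) acc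
            (le_refl _) (by omega) (by omega)
          rw [(by omega : j + 1 - j = 1)] at this
          exact this
      rw [hfirst]
      by_cases hcase : e = n
      · -- last (possibly partial) chunk of the row
        rw [hcase, PySem.List.pyRange_one_eq_nil (le_refl _), List.foldl_nil]
        rw [chunksPos_cons d1 (row.drop j) (by simp [List.drop_eq_nil_iff]; omega)]
        have hdropnil : (row.drop j).drop (d1+1) = [] := by
          rw [List.drop_drop]
          exact List.drop_eq_nil_of_le (by omega)
        rw [hdropnil, chunksPos_nil]
        have hlen : (row.drop j).length = n - j := by simp [hn]
        have h1 : (row.drop j).take (n - j) = row.drop j := List.take_of_length_le (by omega)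
        have h2 : (row.drop j).take (d1+1) = row.drop j := List.take_of_length_le (by omega)
        simp [h1, h2]
      · -- full chunk; recurse from e = j + (d1+1)
        have hee : e = j + (d1+1) := by omega
        have := ih e (by omega) (hee ▸ dvd_add hdvd (dvd_refl _))
          ((row.drop j).take (e - j)) (acc ++ [(row.drop j).take (e - j)])
        rw [this, chunksPos_cons d1 (row.drop j) (by simp [List.drop_eq_nil_iff]; omega)]
        rw [List.drop_drop, (by omega : j + (d1 + 1) = e), (by omega : e - j = d1 + 1)]
        simp

-- both whole programs, fold over an arbitrary list of outer indices
lemma outer_eq (rts : List (List Int)) (d1 : Nat) :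
    ∀ (idxs : List Int) (buf : List Int) (acc : List (List Int)),
      (idxs.foldl
          (fun st step_index =>
            let response_step := PySem.List.pyGetD rts step_index []
            (PySem.List.pyRange 0 response_step.length 1).foldl
              (stepA response_step ((d1+1 : Nat) : Int)) st)
          (buf, acc)).2
      = idxs.foldl
          (fun res step_index =>
            let row := PySem.List.pyGetD rts step_index []
            (PySem.List.pyRange 0 row.length ((d1+1 : Nat) : Int)).foldl
              (stepB row ((d1+1 : Nat) : Int)) res)
          acc := by
  intro idxs
  induction idxs with
  | nil => intro buf acc; rfl
  | cons si rest ih =>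
    intro buf acc
    simp only [List.foldl_cons]
    set row := PySem.List.pyGetD rts si [] with hrow
    set st1 := (PySem.List.pyRange 0 (row.length : Int) 1).foldl
      (stepA row ((d1+1 : Nat) : Int)) (buf, acc) with hst1
    have hst2 : st1.2 = acc ++ chunksPos d1 row := by
      have := innerA_from row d1 row.length 0 (by omega) (Dvd.intro 0 rfl) buf acc
      simp only [Nat.cast_zero, List.drop_zero] at this
      rw [hst1]
      exact this
    have hB : (PySem.List.pyRange 0 (row.length : Int) ((d1+1 : Nat) : Int)).foldl
        (stepB row ((d1+1 : Nat) : Int)) acc = acc ++ chunksPos d1 row := by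
      have := innerB_from row d1 row.length 0 (by omega) (Dvd.intro 0 rfl) acc
      simp only [Nat.cast_zero, List.drop_zero] at this
      exact this
    calc (rest.foldl _ st1).2
        = (rest.foldl _ (st1.1, st1.2)).2 := by rw [Prod.mk.eta]
      _ = rest.foldl _ st1.2 := ih st1.1 st1.2
      _ = _ := by rw [hst2, hB]

-- ===== VERDICT (by name: the statement is the Claim_ definition above) =====
theorem response_complete_sequence_spec : Claim_equal_response_complete_sequence := by
  intro steps rts d _hdom hpre
  obtain ⟨hd, _⟩ := hpre
  unfold Spec_response_complete_sequence response_complete_sequence response_complete_sequence_alt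
  obtain ⟨d1, rfl⟩ : ∃ d1 : Nat, d = ((d1+1 : Nat) : Int) :=
    ⟨(d.toNat - 1), by omega⟩
  exact outer_eq rts d1 _ [] []
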